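-- pv_equiv track=rewrite | github.com/TomAintAround/iprp-classes | 2024-11-12/strsub.py | strsub
-- ===== SOURCE A (Python) =====
-- def strsub(frase: str, remover: str) -> str:
-- 	posicao: int = 0
-- 	for letra in remover:
-- 		if letra not in frase[posicao::]:
-- 			break
-- 		posicao += frase[posicao::].index(letra)
-- 		frase = frase[:posicao:] + frase[posicao::].replace(letra, "", 1)
-- 	return frase
-- ===== SOURCE B (Python) =====
-- def strsub(frase: str, remover: str) -> str:
--     out = []
--     j = 0
--     for ch in frase:
--         if j < len(remover) and ch == remover[j]:
--             j += 1
--         else: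
--             out.append(ch)
--     return "".join(out)
-- ===== Notes on version B (the rewrite author's own statement) =====
-- stated objective: faster
-- what changed: Replaced A's per-letter slice/index/replace passes over frase with a single two-pointer pass that walks frase once, skipping each character that matches the next pending character of remover.
import Mathlib
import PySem

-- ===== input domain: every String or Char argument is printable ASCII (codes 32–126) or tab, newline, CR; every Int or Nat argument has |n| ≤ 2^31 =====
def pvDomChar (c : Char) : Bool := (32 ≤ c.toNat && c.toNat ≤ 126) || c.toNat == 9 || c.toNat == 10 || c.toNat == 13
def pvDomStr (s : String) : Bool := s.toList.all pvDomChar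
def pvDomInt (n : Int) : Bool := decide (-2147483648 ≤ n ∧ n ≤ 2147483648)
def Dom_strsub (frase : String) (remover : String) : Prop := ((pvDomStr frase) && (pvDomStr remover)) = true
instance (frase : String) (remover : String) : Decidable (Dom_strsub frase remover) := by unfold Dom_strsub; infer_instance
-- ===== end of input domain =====

-- B replaces A's repeated slice/index/replace passes with one two-pointer pass over frase and remover (faster).

-- ===== PORT A =====
-- `s.replace(c, "", 1)` for single-character `c`: removes the first occurrence, exact
-- (hand-ported step for step; PySem.Chars.replace has no count parameter).
def pvRemoveFirst (c : Char) : List Char → List Char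
  | [] => []
  | x :: xs => if x = c then xs else x :: pvRemoveFirst c xs

-- A's `for letra in remover` loop. `frase.drop pos` / `frase.take pos` ARE the slices
-- `frase[posicao::]` / `frase[:posicao:]` at the Nat index `pos` (PySem.List.slice_from_natCast /
-- slice_to_natCast); `.index(letra)` is `PySem.Chars.find`, guarded by the `in` test so it is ≥ 0.
def pvLoopA (frase : List Char) (pos : Nat) : List Char → List Char
  | [] => frase
  | letra :: rest =>
      if PySem.Chars.isIn [letra] (frase.drop pos) then
        let pos' := pos + (PySem.Chars.find (frase.drop pos) [letra]).toNat
        pvLoopA (frase.take pos' ++ pvRemoveFirst letra (frase.drop pos')) pos' rest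
      else frase

def strsub (frase : String) (remover : String) : String :=
  String.ofList (pvLoopA frase.toList 0 remover.toList)

-- ===== PORT B =====
-- B's single pass: walk frase; the head of the remaining remover list is remover[j].
def pvLoopB : List Char → List Char → List Char
  | [], _ => []
  | x :: xs, [] => x :: pvLoopB xs []
  | x :: xs, r :: rs => if x = r then pvLoopB xs rs else x :: pvLoopB xs (r :: rs)

def strsub_alt (frase : String) (remover : String) : String :=
  String.ofList (pvLoopB frase.toList remover.toList)

-- ===== PRECONDITION & SPEC =====
def Spec_strsub (frase : String) (remover : String) (out : String) : Prop := out = strsub_alt frase remover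
instance (frase : String) (remover : String) (out : String) : Decidable (Spec_strsub frase remover out) := by unfold Spec_strsub; infer_instance

-- ===== CLAIM (what is proved, stated in full; the proofs are below) =====
def Claim_equal_strsub : Prop := ∀ (frase : String) (remover : String), Dom_strsub frase remover → Spec_strsub frase remover (strsub frase remover)

-- ===== LEMMAS AND PROOFS =====

theorem pvLoopB_nil_rem (xs : List Char) : pvLoopB xs [] = xs := by
  induction xs with
  | nil => rfl
  | cons x xs ih => simp [pvLoopB, ih]

theorem pvLoopB_not_mem (a : Char) (xs rs : List Char) (h : a ∉ xs) :
    pvLoopB xs (a :: rs) = xs := by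
  induction xs with
  | nil => rfl
  | cons x xs ih =>
    have hx : x ≠ a := fun hxa => h (hxa ▸ List.mem_cons_self ..)
    simp only [pvLoopB, if_neg hx]
    rw [ih (fun hm => h (List.mem_cons_of_mem _ hm))]

theorem pvLoopB_found (a : Char) (u v rs : List Char) (h : a ∉ u) :
    pvLoopB (u ++ a :: v) (a :: rs) = u ++ pvLoopB v rs := by
  induction u with
  | nil => simp [pvLoopB]
  | cons x u ih =>
    have hx : x ≠ a := fun hxa => h (hxa ▸ List.mem_cons_self ..)
    simp only [List.cons_append, pvLoopB, if_neg hx]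
    rw [ih (fun hm => h (List.mem_cons_of_mem _ hm))]

-- The single characterisation: A's loop keeps the prefix before `pos` untouched and acts as
-- the two-pointer pass on the suffix.
theorem pvLoopA_eq (rem : List Char) : ∀ (frase : List Char) (pos : Nat),
    pvLoopA frase pos rem = frase.take pos ++ pvLoopB (frase.drop pos) rem := by
  induction rem with
  | nil => intro frase pos; simp [pvLoopA, pvLoopB_nil_rem]
  | cons letra rest ih =>
    intro frase pos
    by_cases hin : PySem.Chars.isIn [letra] (frase.drop pos) = true
    · -- found branch
      have hinf : [letra] <:+: frase.drop pos := (PySem.Chars.isIn_iff_infix _ _).1 hin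
      have hfind : (0:Int) ≤ PySem.Chars.find (frase.drop pos) [letra] :=
        (PySem.Chars.find_nonneg_iff _ _).2 hinf
      obtain ⟨hpre, hmin⟩ := PySem.Chars.find_spec hfind
      rw [pvLoopA, if_pos hin]
      set k := (PySem.Chars.find (frase.drop pos) [letra]).toNat with hk
      obtain ⟨t, hdrop⟩ : ∃ t, (frase.drop pos).drop k = letra :: t := by
        rcases hpre with ⟨t, ht⟩
        exact ⟨t, by simpa using ht.symm⟩
      have hklt : k < (frase.drop pos).length := by
        by_contra hk'
        have : (frase.drop pos).drop k = [] := List.drop_eq_nil_of_le (by omega)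
        simp [this] at hdrop
      have hnotmem : letra ∉ (frase.drop pos).take k := by
        intro hm
        obtain ⟨i, hi, hget⟩ := List.getElem_of_mem hm
        have hik : i < k := by simp [List.length_take] at hi; omega
        have hil : i < (frase.drop pos).length := by omega
        have : (frase.drop pos).drop i = letra :: (frase.drop pos).drop (i+1) := by
          rw [List.drop_eq_getElem_cons hil, ← hget, List.getElem_take]
        exact hmin i hik ⟨(frase.drop pos).drop (i+1), by simp [this]⟩
      have hlen : pos + k < frase.length := by
        have : (frase.drop pos).length = frase.length - pos := by simp
        omega
      have hsplit : frase.drop pos = (frase.drop pos).take k ++ letra :: t := by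
        conv_lhs => rw [← List.take_append_drop k (frase.drop pos)]
        rw [hdrop]
      have hdrop2 : frase.drop (pos + k) = letra :: t := by
        rw [← hdrop, List.drop_drop, Nat.add_comm]
      have hremove : pvRemoveFirst letra (frase.drop (pos + k)) = t := by
        rw [hdrop2]; simp [pvRemoveFirst]
      have htake2 : frase.take (pos + k) = frase.take pos ++ (frase.drop pos).take k :=
        List.take_add ..
      have hlentake : (frase.take (pos + k)).length = pos + k := by
        simp [List.length_take]; omega
      show pvLoopA (frase.take (pos + k) ++ pvRemoveFirst letra (frase.drop (pos + k)))
          (pos + k) rest = frase.take pos ++ pvLoopB (frase.drop pos) (letra :: rest)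
      rw [hremove, ih (frase.take (pos + k) ++ t) (pos + k),
        List.take_left' hlentake, List.drop_left' hlentake, htake2]
      conv_rhs => rw [hsplit]
      rw [pvLoopB_found letra _ _ _ hnotmem]
      simp
    · -- not-found branch: A breaks; B keeps the whole suffix
      have hnm : letra ∉ frase.drop pos := by
        intro hm
        obtain ⟨u, v, huv⟩ := List.append_of_mem hm
        exact hin ((PySem.Chars.isIn_iff_infix _ _).2 ⟨u, v, by simp [huv]⟩)
      rw [pvLoopA, if_neg (by simpa using hin), pvLoopB_not_mem _ _ _ hnm,
        List.take_append_drop]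

-- ===== VERDICT (by name: the statement is the Claim_ definition above) =====
theorem strsub_spec : Claim_equal_strsub := by
  intro frase remover _
  show strsub frase remover = strsub_alt frase remover
  unfold strsub strsub_alt
  rw [pvLoopA_eq]
  simp
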